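-- pv_equiv track=rewrite | github.com/SUwonglab/arcsv | arcsv/sv_parse_reads.py | block_seq_to_path
-- ===== SOURCE A (Python) =====
-- def block_seq_to_path(seq):
--     path = [seq[0]]
--     for i in range(1, len(seq) - 1):
--         flipped = seq[i] + 1 if (seq[i] % 2 == 0) else seq[i] - 1
--         path.extend([flipped, seq[i]])
--     if len(seq) > 1:
--         flipped = seq[-1] + 1 if (seq[-1] % 2 == 0) else seq[-1] - 1
--         path.append(flipped)
--     return tuple(path)
-- ===== SOURCE B (Python) =====
-- def block_seq_to_path(seq):
--     n = len(seq)
--     first = seq[0]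
--     if n == 1:
--         return (first,)
--
--     def at(j):
--         k, r = divmod(j + 1, 2)
--         x = seq[k]
--         return x if r else (x + 1 if x % 2 == 0 else x - 1)
--
--     return tuple(at(j) for j in range(2 * n - 2))
-- ===== Notes on version B (the rewrite author's own statement) =====
-- stated objective: alternative
-- what changed: A emits elements by scanning seq and appending [flip, element] pairs with a separate tail branch; B instead computes the output positionally: the result has length 2n-2 (n>1) and position j is directly seq[(j+1)//2], flipped when (j+1) is even, so B is a closed-form index map over range(2n-2) with no interleaved emission or endpoint branch in the loop.
import Mathlib
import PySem

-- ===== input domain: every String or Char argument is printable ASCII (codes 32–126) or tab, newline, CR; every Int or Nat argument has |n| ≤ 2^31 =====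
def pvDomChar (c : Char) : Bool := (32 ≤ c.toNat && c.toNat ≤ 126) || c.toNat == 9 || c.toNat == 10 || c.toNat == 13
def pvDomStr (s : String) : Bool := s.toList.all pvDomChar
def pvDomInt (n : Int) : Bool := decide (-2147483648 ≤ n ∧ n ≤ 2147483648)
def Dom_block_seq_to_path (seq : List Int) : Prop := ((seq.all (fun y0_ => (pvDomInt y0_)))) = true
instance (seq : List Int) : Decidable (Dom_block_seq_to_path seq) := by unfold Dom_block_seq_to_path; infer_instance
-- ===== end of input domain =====

-- B replaces A's scan-and-append emission (interior loop + tail branch) by a positional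
-- closed-form: output position j is seq[(j+1)//2], flipped when j+1 is even (objective: alternative).

-- ===== PORT A =====
def block_seq_to_path (seq : List Int) : List Int :=
  match seq with
  | [] => []          -- Python raises IndexError here (seq[0]); excluded by Pre_
  | s0 :: _ =>
    let path : List Int := [s0]
    let path := (PySem.List.pyRange 1 ((seq.length : Int) - 1) 1).foldl
      (fun path i =>
        let si := PySem.List.pyGetD seq i 0
        let flipped := if PySem.Int.mod si 2 == 0 then si + 1 else si - 1
        path ++ [flipped, si]) path
    if (seq.length : Int) > 1 then
      let sl := PySem.List.pyGetD seq (-1) 0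
      let flipped := if PySem.Int.mod sl 2 == 0 then sl + 1 else sl - 1
      path ++ [flipped]
    else path

-- ===== PORT B =====
def block_seq_to_path_alt (seq : List Int) : List Int :=
  match seq with
  | [] => []          -- Python raises IndexError here (seq[0]); excluded by Pre_
  | s0 :: _ =>
    let n : Int := seq.length
    if n == 1 then [s0]
    else
      (PySem.List.pyRange 0 (2 * n - 2) 1).map (fun j =>
        let k := PySem.Int.floordiv (j + 1) 2
        let r := PySem.Int.mod (j + 1) 2
        let x := PySem.List.pyGetD seq k 0
        if r != 0 then x else (if PySem.Int.mod x 2 == 0 then x + 1 else x - 1))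

-- ===== PRECONDITION & SPEC =====
-- Pre_ excludes only the empty list, on which both Pythons raise IndexError (seq[0]).
def Pre_block_seq_to_path (seq : List Int) : Prop := seq ≠ []
instance (seq : List Int) : Decidable (Pre_block_seq_to_path seq) := by
  unfold Pre_block_seq_to_path; infer_instance
def pvWitness_block_seq_to_path : List Int := [4, 7, 2]

def Spec_block_seq_to_path (seq : List Int) (out : List Int) : Prop := out = block_seq_to_path_alt seq
instance (seq : List Int) (out : List Int) : Decidable (Spec_block_seq_to_path seq out) := by
  unfold Spec_block_seq_to_path; infer_instance

-- ===== CLAIM (what is proved, stated in full; the proofs are below) =====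
def Claim_equal_block_seq_to_path : Prop := ∀ (seq : List Int), Dom_block_seq_to_path seq → Pre_block_seq_to_path seq → Spec_block_seq_to_path seq (block_seq_to_path seq)

-- ===== LEMMAS AND PROOFS =====

-- the flip of one block id, and the [flip x, x] expansion of one element (proof-side names)
def pvFlip (x : Int) : Int := if PySem.Int.mod x 2 == 0 then x + 1 else x - 1
def pvG (x : Int) : List Int := [pvFlip x, x]

lemma dropLast_cons_ne (s0 : Int) (rest : List Int) (h : rest ≠ []) :
    (s0 :: rest).dropLast = s0 :: rest.dropLast := by
  cases rest with
  | nil => exact absurd rfl h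
  | cons b t => simp

-- the interior-index map of A hits exactly rest.dropLast
lemma mid_map (s0 : Int) (rest : List Int) (h : rest ≠ []) :
    (PySem.List.pyRange 1 ((rest.length : Int)) 1).map (fun i => PySem.List.pyGetD (s0 :: rest) i 0)
      = rest.dropLast := by
  have hpos : 0 < rest.length := List.length_pos_iff.mpr h
  have hxlen : (s0 :: rest).dropLast.length = rest.length := by
    rw [dropLast_cons_ne s0 rest h]; simp [List.length_dropLast]; omega
  have hlen : PySem.List.len ((s0 :: rest).dropLast) = (rest.length : Int) := by
    simp [PySem.List.len_eq, hxlen]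
  have hcong : ∀ i ∈ PySem.List.pyRange 1 ((rest.length : Int)) 1,
      PySem.List.pyGetD (s0 :: rest) i 0 = PySem.List.pyGetD ((s0 :: rest).dropLast) i 0 := by
    intro i hi
    rw [PySem.List.mem_pyRange_one] at hi
    obtain ⟨k, rfl⟩ := Int.eq_ofNat_of_zero_le (show (0:Int) ≤ i by omega)
    have hk1 : k < (s0 :: rest).length := by simp; omega
    have hk2 : k < (s0 :: rest).dropLast.length := by rw [hxlen]; omega
    rw [PySem.List.pyGetD_natCast, PySem.List.pyGetD_natCast,
        List.getD_eq_getElem _ _ hk1, List.getD_eq_getElem _ _ hk2,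
        List.getElem_dropLast]
  rw [List.map_congr_left hcong, ← hlen,
      PySem.List.map_pyGetD_pyRange _ _ (a := 1) (by norm_num)]
  rw [dropLast_cons_ne s0 rest h]
  simp

lemma flatMap_comp (f : Int → Int) (L : List Int) :
    L.flatMap (fun i => pvG (f i)) = (L.map f).flatMap pvG := by
  simp [List.flatMap_map]

lemma cons_flat_dropLast (s0 : Int) (rest : List Int) (h : rest ≠ []) :
    (s0 :: rest.flatMap pvG).dropLast
      = s0 :: rest.dropLast.flatMap pvG ++ [pvFlip (rest.getLast h)] := by
  conv_lhs => rw [← List.dropLast_append_getLast h]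
  rw [List.flatMap_append]
  have e : s0 :: (rest.dropLast.flatMap pvG ++ [rest.getLast h].flatMap pvG)
      = (s0 :: (rest.dropLast.flatMap pvG ++ [pvFlip (rest.getLast h)])) ++ [rest.getLast h] := by
    simp [pvG]
  rw [e, List.dropLast_concat]
  simp

lemma hlast_cons (s0 : Int) (rest : List Int) (h : rest ≠ []) :
    (s0 :: rest)[(s0 :: rest).length - 1]'(by simp) = rest.getLast h := by
  have h2 := List.getLast_eq_getElem (l := s0 :: rest) (by simp)
  exact h2.symm.trans (List.getLast_cons h)

-- A's value in closed form
lemma a_closed (s0 : Int) (rest : List Int) :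
    block_seq_to_path (s0 :: rest)
      = if h : rest = [] then [s0]
        else s0 :: rest.dropLast.flatMap pvG ++ [pvFlip (rest.getLast h)] := by
  by_cases h : rest = []
  · subst h
    rw [dif_pos rfl]
    simp only [block_seq_to_path]
    rw [show ((([s0] : List Int).length : Int) - 1) = 0 by simp]
    rw [PySem.List.pyRange_one_eq_nil (a := 1) (b := 0) (by norm_num)]
    simp
  · have hpos : 0 < rest.length := List.length_pos_iff.mpr h
    rw [dif_neg h]
    simp only [block_seq_to_path]
    rw [show (((s0 :: rest).length : Int) - 1) = (rest.length : Int) by simp]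
    rw [PySem.List.foldl_append_eq_flatMap]
    rw [if_pos (by simp; omega)]
    rw [show (fun i => [if PySem.Int.mod (PySem.List.pyGetD (s0 :: rest) i 0) 2 == 0 then
            PySem.List.pyGetD (s0 :: rest) i 0 + 1 else PySem.List.pyGetD (s0 :: rest) i 0 - 1,
            PySem.List.pyGetD (s0 :: rest) i 0])
          = (fun i => pvG (PySem.List.pyGetD (s0 :: rest) i 0)) from by
        funext i; simp [pvG, pvFlip]]
    rw [flatMap_comp, mid_map s0 rest h]
    have hv : PySem.List.pyGetD (s0 :: rest) (-1) 0 = rest.getLast h := by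
      have h1 := PySem.List.pyGetD_neg_natCast (xs := s0 :: rest) (d := 0) (k := 1)
        (by omega) (by simp)
      push_cast at h1
      exact h1.trans (hlast_cons s0 rest h)
    rw [hv]
    simp [pvFlip]

-- length of the [flip x, x] expansion
lemma lenG (L : List Int) : (L.flatMap pvG).length = 2 * L.length := by
  induction L with
  | nil => simp
  | cons x t ih => simp [pvG] at *; omega

-- positional characterisation of the expansion
lemma getG (L : List Int) (i : Nat) (h : i < 2 * L.length) :
    (L.flatMap pvG)[i]'(by rw [lenG]; exact h)
      = if i % 2 = 0 then pvFlip (L[i/2]'(by omega)) else L[i/2]'(by omega) := by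
  induction L generalizing i with
  | nil => simp at h
  | cons x t ih =>
    match i with
    | 0 => simp [pvG]
    | 1 => simp [pvG]
    | (j+2) =>
      have hj : j < 2 * t.length := by simp at h; omega
      have e1 : ((x :: t).flatMap pvG)[j+2]'(by rw [lenG]; simpa using h)
          = (t.flatMap pvG)[j]'(by rw [lenG]; exact hj) := by
        simp [pvG]
      rw [e1, ih j hj]
      have h2 : (j+2) % 2 = j % 2 := by omega
      have h3 : (j+2)/2 = j/2 + 1 := by omega
      have h4 : j / 2 < t.length := by omega
      by_cases hp : j % 2 = 0
      · simp [hp, h2]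
      · simp [hp, h2]

-- B's value in the same closed form
lemma b_closed (s0 : Int) (rest : List Int) :
    block_seq_to_path_alt (s0 :: rest)
      = if h : rest = [] then [s0]
        else s0 :: rest.dropLast.flatMap pvG ++ [pvFlip (rest.getLast h)] := by
  by_cases h : rest = []
  · subst h; simp [block_seq_to_path_alt]
  · have hpos : 0 < rest.length := List.length_pos_iff.mpr h
    rw [dif_neg h]
    simp only [block_seq_to_path_alt]
    rw [if_neg (by simp; omega)]
    -- step 1: the index-built list equals the slice of the full expansion
    have key :
        (PySem.List.pyRange 0 (2 * ((s0 :: rest).length : Int) - 2) 1).map (fun j =>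
          let k := PySem.Int.floordiv (j + 1) 2
          let r := PySem.Int.mod (j + 1) 2
          let x := PySem.List.pyGetD (s0 :: rest) k 0
          if r != 0 then x else (if PySem.Int.mod x 2 == 0 then x + 1 else x - 1))
        = (((s0 :: rest).flatMap pvG).drop 1).dropLast := by
      set N : Nat := (s0 :: rest).length with hN
      have hN2 : 2 ≤ N := by simp [hN]; omega
      have hrange : (2 * (N : Int) - 2) = ((2 * N - 2 : Nat) : Int) := by omega
      rw [hrange, PySem.List.pyRange_zero_nat]
      apply List.ext_getElem
      · simp only [List.length_map, List.length_range, List.length_dropLast,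
          List.length_drop, lenG]
        simp only [hN, List.length_cons]
        omega
      · intro m hm1 hm2
        simp only [List.getElem_map, List.getElem_range]
        have hm : m < 2 * N - 2 := by simpa using hm1
        have hk : (m + 1) / 2 < N := by omega
        have e2 : PySem.Int.floordiv ((m : Int) + 1) 2 = (((m + 1) / 2 : Nat) : Int) := by
          rw [show ((m : Int) + 1) = ((m + 1 : Nat) : Int) by push_cast; ring]
          exact_mod_cast PySem.Int.floordiv_natCast (m + 1) 2
        have e3 : PySem.Int.mod ((m : Int) + 1) 2 = (((m + 1) % 2 : Nat) : Int) := by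
          rw [show ((m : Int) + 1) = ((m + 1 : Nat) : Int) by push_cast; ring]
          exact_mod_cast PySem.Int.mod_natCast (m + 1) 2
        have e4 : PySem.List.pyGetD (s0 :: rest) (((m + 1) / 2 : Nat) : Int) 0
            = (s0 :: rest)[(m + 1) / 2]'(hk) := by
          rw [PySem.List.pyGetD_natCast, List.getD_eq_getElem _ _ hk]
        have hdl : (m + 1) < 2 * N := by omega
        have e5 : ((((s0 :: rest).flatMap pvG).drop 1).dropLast)[m]'(hm2)
            = ((s0 :: rest).flatMap pvG)[m + 1]'(by rw [lenG]; exact hdl) := by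
          rw [List.getElem_dropLast, List.getElem_drop]
          congr 1; omega
        rw [e5, getG _ _ hdl]
        simp only [e2, e3, e4]
        by_cases hp : (m + 1) % 2 = 0
        · simp [hp, pvFlip]
        · have : (m + 1) % 2 = 1 := by omega
          simp [this]
    rw [key]
    rw [show (s0 :: rest).flatMap pvG = pvFlip s0 :: s0 :: rest.flatMap pvG from by simp [pvG]]
    rw [List.drop_one, List.tail_cons]
    exact cons_flat_dropLast s0 rest h

-- ===== VERDICT (by name: the statement is the Claim_ definition above) =====
theorem block_seq_to_path_spec : Claim_equal_block_seq_to_path := by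
  intro seq _ hpre
  unfold Spec_block_seq_to_path
  cases seq with
  | nil => exact absurd rfl hpre
  | cons s0 rest => rw [a_closed, b_closed]
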